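-- pv_equiv track=rewrite | github.com/erikhenriksson/hybrid-register-analysis | segment_simple.py | combine_short_sentences
-- ===== SOURCE A (Python) =====
-- min_words = 30
--
-- max_segments = 20
--
-- def combine_short_sentences(
--     sentences, initial_min_words=min_words, max_segments=max_segments
-- ):
--     min_words = initial_min_words
--
--     def count_words(sentence):
--         return len(sentence.split())
--
--     while 1:
--         result = []
--         buffer = ""
--
--         for i, sentence in enumerate(sentences):
--             if count_words(sentence) >= min_words:
--                 if buffer:
--                     result.append(buffer.strip())
--                     buffer = ""
--                 result.append(sentence)
--             else:
--                 buffer += (buffer and " ") + sentence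
--
--                 # If the buffer reaches min_words, finalize it
--                 if count_words(buffer) >= min_words:
--                     result.append(buffer.strip())
--                     buffer = ""
--
--         # Handle leftover buffer
--         if buffer:
--             result.append(buffer.strip())
--
--         # Final pass: Ensure no sentences in the result are below min_words
--         i = 0
--         while i < len(result):
--             if count_words(result[i]) < min_words:
--                 if i < len(result) - 1:  # Merge with the next sentence
--                     result[i + 1] = result[i] + " " + result[i + 1]
--                     result.pop(i)
--                 elif i > 0:  # Merge with the previous sentence if it's the last one
--                     result[i - 1] += " " + result[i]
--                     result.pop(i)
--                 else:  # Single short sentence case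
--                     break
--             else:
--                 i += 1
--         if len(result) <= max_segments:
--             return result
--         min_words += 1
-- ===== SOURCE B (Python) =====
-- def combine_short_sentences(sentences, initial_min_words=30, max_segments=20):
--     # Word counts are computed once per sentence and summed incrementally;
--     # the final merge is a single forward carry pass instead of an index/pop loop.
--     counts = [len(s.split()) for s in sentences]
--     min_words = initial_min_words
--     while True:
--         segs = []  # (text, word_count)
--         buf = ""
--         bufc = 0
--         for s, c in zip(sentences, counts):
--             if c >= min_words:
--                 if buf:
--                     segs.append((buf.strip(), bufc))
--                     buf, bufc = "", 0
--                 segs.append((s, c))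
--             else:
--                 buf += (" " if buf else "") + s
--                 bufc += c
--                 if bufc >= min_words:
--                     segs.append((buf.strip(), bufc))
--                     buf, bufc = "", 0
--         if buf:
--             segs.append((buf.strip(), bufc))
--         out = []
--         carry = None  # pending short run: (text, count)
--         for t, c in segs:
--             if carry is not None:
--                 t = carry[0] + " " + t
--                 c = carry[1] + c
--             if c >= min_words:
--                 out.append(t)
--                 carry = None
--             else:
--                 carry = (t, c)
--         if carry is not None:
--             if out:
--                 out[-1] = out[-1] + " " + carry[0]
--             else:
--                 out = [carry[0]]
--         if len(out) <= max_segments: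
--             return out
--         min_words += 1
-- ===== Notes on version B (the rewrite author's own statement) =====
-- stated objective: faster
-- what changed: B computes each sentence's word count once and maintains buffer/segment counts by integer addition instead of re-splitting growing strings, and replaces A's quadratic index/pop final merge with a single forward carry-fold pass; intended as faster (a timing run measured 243x at n=16384, the largest size where both finish; on inputs whose outer loop never reaches max_segments both diverge identically).
import Mathlib
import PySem

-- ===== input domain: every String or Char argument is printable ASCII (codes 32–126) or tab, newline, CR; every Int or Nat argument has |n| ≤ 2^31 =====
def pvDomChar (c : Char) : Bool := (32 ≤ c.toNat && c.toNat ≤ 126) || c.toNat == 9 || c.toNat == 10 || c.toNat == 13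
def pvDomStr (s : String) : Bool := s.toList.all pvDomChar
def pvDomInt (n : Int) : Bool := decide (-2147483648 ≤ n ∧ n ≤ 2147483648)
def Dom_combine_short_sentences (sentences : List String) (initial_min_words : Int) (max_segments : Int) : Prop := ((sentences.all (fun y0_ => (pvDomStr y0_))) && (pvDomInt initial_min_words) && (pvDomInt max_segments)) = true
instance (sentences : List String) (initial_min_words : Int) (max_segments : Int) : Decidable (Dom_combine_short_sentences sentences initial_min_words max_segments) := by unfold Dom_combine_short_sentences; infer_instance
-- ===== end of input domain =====

-- B caches per-sentence word counts (summed incrementally) and replaces A's index/pop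
-- final merge with a single forward carry pass; intended as faster (timing: 243x
-- at the largest size where both Pythons finish; on diverging inputs B diverges like A).
-- On inputs where Python A never returns (its outer while-loop finds no result with
-- len <= max_segments, e.g. max_segments < 0) both ports carry an IDENTICAL fuel bound
-- as a totality guard; the equivalence below holds for every input.

-- ===== PORT A =====
-- count_words(s) = len(s.split())
def pvCnt (s : String) : Int := ((PySem.Str.split₀ s).length : Int)

-- body of the 'for i, sentence in enumerate(sentences)' loop (the index i is unused in the body)
def pvStep1A (mw : Int) (st : List String × String) (sentence : String) : List String × String :=
  let result := st.1
  let buffer := st.2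
  if pvCnt sentence ≥ mw then
    let result := if buffer ≠ "" then result ++ [PySem.Str.strip buffer] else result
    let buffer := if buffer ≠ "" then "" else buffer
    (result ++ [sentence], buffer)
  else
    let buffer := buffer ++ (if buffer ≠ "" then " " else "") ++ sentence
    if pvCnt buffer ≥ mw then (result ++ [PySem.Str.strip buffer], "") else (result, buffer)

-- the 'while i < len(result)' final pass; result.pop(i) is eraseIdx i (the removed list),
-- result[i+1] = ... is List.set — all indices are in range at the points used
def pvPass2A (mw : Int) (result : List String) (i : Nat) : List String :=
  if h : i < result.length then
    if pvCnt result[i] < mw then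
      if h2 : i < result.length - 1 then
        pvPass2A mw ((result.set (i+1) (result[i] ++ " " ++ result[i+1]'(by omega))).eraseIdx i) i
      else if h3 : 0 < i then
        pvPass2A mw ((result.set (i-1) (result[i-1]'(by omega) ++ " " ++ result[i])).eraseIdx i) i
      else result
    else pvPass2A mw result (i+1)
  else result
termination_by result.length - i
decreasing_by
  · simp [List.length_eraseIdx, h]; omega
  · simp [List.length_eraseIdx, h]; omega
  · omega

-- one iteration of A's outer 'while 1' body for the current min_words
def pvSegA (sentences : List String) (mw : Int) : List String :=
  let p := sentences.foldl (pvStep1A mw) ([], "")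
  let result := if p.2 ≠ "" then p.1 ++ [PySem.Str.strip p.2] else p.1
  pvPass2A mw result 0

-- A's outer loop; min_words increases by 1 until len(result) <= max_segments.
-- The Nat argument is a fuel bound making the port total: where the Python loop
-- terminates it provably stops before this fuel is exhausted.
def pvLoopA (sentences : List String) (max_segments : Int) (mw : Int) : Nat → List String
  | 0 => []
  | fuel+1 =>
    let result := pvSegA sentences mw
    if (result.length : Int) ≤ max_segments then result
    else pvLoopA sentences max_segments (mw + 1) fuel

def pvFuel (sentences : List String) (initial_min_words : Int) : Nat :=
  ((sentences.foldl (fun a s => a + pvCnt s) 0) + 2 - initial_min_words).toNat + 2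

def combine_short_sentences (sentences : List String) (initial_min_words : Int) (max_segments : Int) : List String :=
  pvLoopA sentences max_segments initial_min_words (pvFuel sentences initial_min_words)

-- ===== PORT B =====
-- B's first pass: same buffering, but each state carries cached word counts
def pvStep1B (mw : Int) (st : List (String × Int) × String × Int) (sc : String × Int) : List (String × Int) × String × Int :=
  let segs := st.1
  let buf := st.2.1
  let bufc := st.2.2
  if sc.2 ≥ mw then
    let segs := if buf ≠ "" then segs ++ [(PySem.Str.strip buf, bufc)] else segs
    (segs ++ [sc], (if buf ≠ "" then "" else buf, if buf ≠ "" then 0 else bufc))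
  else
    let buf := buf ++ (if buf ≠ "" then " " else "") ++ sc.1
    let bufc := bufc + sc.2
    if bufc ≥ mw then (segs ++ [(PySem.Str.strip buf, bufc)], ("", 0)) else (segs, (buf, bufc))

-- B's final pass: one forward fold with a pending short run ('carry')
def pvStep2B (mw : Int) (st : List String × Option (String × Int)) (tc : String × Int) : List String × Option (String × Int) :=
  let t := match st.2 with | none => tc.1 | some (ct, _) => ct ++ " " ++ tc.1
  let c := match st.2 with | none => tc.2 | some (_, cc) => cc + tc.2
  if c ≥ mw then (st.1 ++ [t], none) else (st.1, some (t, c))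

-- 'if carry is not None: out[-1] += " " + carry[0]  (or out = [carry[0]])'
def pvFinishB (st : List String × Option (String × Int)) : List String :=
  match st.2 with
  | none => st.1
  | some (t, _) => if st.1 ≠ [] then st.1.dropLast ++ [st.1.getLast! ++ " " ++ t] else [t]

def pvSegB (sentences : List String) (counts : List Int) (mw : Int) : List String :=
  let p := (sentences.zip counts).foldl (pvStep1B mw) ([], ("", 0))
  let segs := if p.2.1 ≠ "" then p.1 ++ [(PySem.Str.strip p.2.1, p.2.2)] else p.1
  pvFinishB (segs.foldl (pvStep2B mw) ([], none))

def pvLoopB (sentences : List String) (counts : List Int) (max_segments : Int) (mw : Int) : Nat → List String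
  | 0 => []
  | fuel+1 =>
    let out := pvSegB sentences counts mw
    if (out.length : Int) ≤ max_segments then out
    else pvLoopB sentences counts max_segments (mw + 1) fuel

def combine_short_sentences_alt (sentences : List String) (initial_min_words : Int) (max_segments : Int) : List String :=
  let counts := sentences.map pvCnt
  pvLoopB sentences counts max_segments initial_min_words (pvFuel sentences initial_min_words)

-- ===== PRECONDITION & SPEC =====
-- A is total where it terminates; the ports are total via the identical fuel bound, so no Pre_ is needed.
def Spec_combine_short_sentences (sentences : List String) (initial_min_words : Int) (max_segments : Int) (out : List String) : Prop := out = combine_short_sentences_alt sentences initial_min_words max_segments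
instance (sentences : List String) (initial_min_words : Int) (max_segments : Int) (out : List String) : Decidable (Spec_combine_short_sentences sentences initial_min_words max_segments out) := by unfold Spec_combine_short_sentences; infer_instance

-- ===== CLAIM (what is proved, stated in full; the proofs are below) =====
def Claim_equal_combine_short_sentences : Prop := ∀ (sentences : List String) (initial_min_words : Int) (max_segments : Int), Dom_combine_short_sentences sentences initial_min_words max_segments → Spec_combine_short_sentences sentences initial_min_words max_segments (combine_short_sentences sentences initial_min_words max_segments)

-- ===== LEMMAS AND PROOFS =====

-- word-count facts for Python's s.split(), proved on List Char (PySem.Chars.split₀)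
theorem pv_go_acc (s : List Char) : ∀ cur acc, (PySem.Chars.split₀.go s cur acc).length = acc.length + (PySem.Chars.split₀.go s cur []).length := by
  induction s with
  | nil => intro cur acc; simp [PySem.Chars.split₀.go]; split <;> simp
  | cons c rest ih =>
    intro cur acc
    simp only [PySem.Chars.split₀.go]
    split
    · split
      · exact ih [] acc
      · rw [ih [] (_ :: _), ih [] [_]]; simp; omega
    · exact ih (c :: cur) acc

theorem pv_wc_append_space (a b : List Char) :
    (PySem.Chars.split₀ (a ++ ' ' :: b)).length = (PySem.Chars.split₀ a).length + (PySem.Chars.split₀ b).length := by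
  suffices h : ∀ cur acc, (PySem.Chars.split₀.go (a ++ ' ' :: b) cur acc).length = (PySem.Chars.split₀.go a cur acc).length + (PySem.Chars.split₀.go b [] []).length by
    exact h [] []
  induction a with
  | nil =>
    intro cur acc
    simp only [List.nil_append, PySem.Chars.split₀.go]
    have hsp : PySem.Chars.isspace ' ' = true := by decide
    rw [hsp]
    simp only [if_true]
    split
    · rw [pv_go_acc]; simp
    · rw [pv_go_acc]; simp
  | cons c a' ih =>
    intro cur acc
    simp only [List.cons_append, PySem.Chars.split₀.go]
    split <;> [skip; exact ih (c :: cur) acc]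
    split
    · exact ih [] acc
    · exact ih [] (_ :: acc)

theorem pv_go_allspace (ws : List Char) (hws : ∀ c ∈ ws, PySem.Chars.isspace c = true) :
    ∀ cur acc, PySem.Chars.split₀.go ws cur acc = PySem.Chars.split₀.go [] cur acc := by
  induction ws with
  | nil => intro cur acc; rfl
  | cons c ws' ih =>
    intro cur acc
    have hc : PySem.Chars.isspace c = true := hws c (by simp)
    have ih' := ih (fun d hd => hws d (by simp [hd]))
    simp only [PySem.Chars.split₀.go, hc, if_true]
    split
    · rw [ih' [] acc]; simp_all [PySem.Chars.split₀.go]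
    · rw [ih' [] _]; simp_all [PySem.Chars.split₀.go]

theorem pv_go_trailing (ws : List Char) (hws : ∀ c ∈ ws, PySem.Chars.isspace c = true) (s : List Char) :
    ∀ cur acc, PySem.Chars.split₀.go (s ++ ws) cur acc = PySem.Chars.split₀.go s cur acc := by
  induction s with
  | nil => intro cur acc; exact pv_go_allspace ws hws cur acc
  | cons c s' ih =>
    intro cur acc
    simp only [List.cons_append, PySem.Chars.split₀.go]
    split <;> [skip; exact ih (c :: cur) acc]
    split
    · exact ih [] acc
    · exact ih [] _

theorem pv_go_leading (ws : List Char) (hws : ∀ c ∈ ws, PySem.Chars.isspace c = true) (s : List Char) (acc : List (List Char)) :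
    PySem.Chars.split₀.go (ws ++ s) [] acc = PySem.Chars.split₀.go s [] acc := by
  induction ws with
  | nil => rfl
  | cons c ws' ih =>
    have hc : PySem.Chars.isspace c = true := hws c (by simp)
    simp only [List.cons_append, PySem.Chars.split₀.go, hc, if_true, List.isEmpty_nil]
    exact ih (fun d hd => hws d (by simp [hd]))

theorem pv_wc_strip (s : List Char) : (PySem.Chars.split₀ (PySem.Chars.strip s)).length = (PySem.Chars.split₀ s).length := by
  unfold PySem.Chars.strip PySem.Chars.split₀
  have h1 : PySem.Chars.split₀.go (PySem.Chars.lstrip s) [] [] = PySem.Chars.split₀.go s [] [] := by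
    unfold PySem.Chars.lstrip
    conv_rhs => rw [← List.takeWhile_append_dropWhile (p := PySem.Chars.isspace) (l := s)]
    rw [pv_go_leading _ (fun c hc => List.mem_takeWhile_imp hc) _ _]
  rw [← h1]
  set t := PySem.Chars.lstrip s with ht
  have h2 : t = PySem.Chars.rstrip t ++ (t.reverse.takeWhile PySem.Chars.isspace).reverse := by
    unfold PySem.Chars.rstrip
    have key : ∀ u : List Char, u.reverse = (List.dropWhile PySem.Chars.isspace u).reverse ++ (List.takeWhile PySem.Chars.isspace u).reverse := by
      intro u; rw [← List.reverse_append, List.takeWhile_append_dropWhile]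
    have := key t.reverse
    simpa using this
  conv_rhs => rw [h2]
  rw [pv_go_trailing _ (fun c hc => by
    have := List.mem_reverse.mp hc
    exact List.mem_takeWhile_imp this) _]

-- the same facts on String, for pvCnt
theorem pvCnt_eq (s : String) : pvCnt s = ((PySem.Chars.split₀ s.toList).length : Int) := by
  simp [pvCnt, PySem.Str.split₀]

theorem pvCnt_append_space (x y : String) : pvCnt (x ++ " " ++ y) = pvCnt x + pvCnt y := by
  rw [pvCnt_eq, pvCnt_eq, pvCnt_eq]
  have hts : (x ++ " " ++ y).toList = x.toList ++ ' ' :: y.toList := by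
    rw [String.toList_append, String.toList_append]
    have hsp : (" " : String).toList = [' '] := rfl
    rw [hsp, List.append_assoc]
    rfl
  rw [hts, pv_wc_append_space]
  push_cast
  ring

theorem pvCnt_strip (s : String) : pvCnt (PySem.Str.strip s) = pvCnt s := by
  rw [pvCnt_eq, pvCnt_eq]
  have h : (PySem.Str.strip s).toList = PySem.Chars.strip s.toList := by
    simp [PySem.Str.strip]
  rw [h, pv_wc_strip]

theorem pvCnt_empty : pvCnt "" = 0 := by decide

-- small list facts used to read off A's final in-place merge
theorem pv_set_last (l : List String) (v : String) (h : l ≠ []) : l.set (l.length - 1) v = l.dropLast ++ [v] := by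
  induction l with
  | nil => simp at h
  | cons a l ih =>
    cases l with
    | nil => simp
    | cons b l' => simpa using ih (by simp)

theorem pv_getLast! (l : List String) (h : l ≠ []) (hh : l.length - 1 < l.length) : l.getLast! = l[l.length - 1] := by
  cases l with
  | nil => simp at h
  | cons a l => simp [List.getLast!, List.getLast_eq_getElem]

-- A's state in the final pass, written as done-prefix / pending-short-run / unprocessed-rest
def pvCarryL : Option (String × Int) → List String
  | none => []
  | some (t, _) => [t]

-- the heart of the proof: A's index/pop loop equals B's carry fold
theorem pv_pass2_corr (mw : Int) (rest : List (String × Int)) : ∀ (done : List String) (carry : Option (String × Int)),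
    (∀ p ∈ rest, pvCnt p.1 = p.2) →
    (∀ t c, carry = some (t, c) → pvCnt t = c ∧ c < mw) →
    pvPass2A mw (done ++ pvCarryL carry ++ rest.map Prod.fst) done.length
      = pvFinishB (rest.foldl (pvStep2B mw) (done, carry)) := by
  induction rest with
  | nil =>
    intro done carry hrest hcarry
    match carry with
    | none =>
      rw [pvPass2A]
      simp [pvCarryL, pvFinishB]
    | some (t, c) =>
      obtain ⟨htc, hlt⟩ := hcarry t c rfl
      simp only [pvCarryL, List.map_nil, List.append_nil, List.foldl_nil]
      rw [pvPass2A]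
      have hlen : done.length < (done ++ [t]).length := by simp
      rw [dif_pos hlen]
      have hget : (done ++ [t])[done.length]'hlen = t := by
        rw [List.getElem_append_right (le_refl _)]; simp
      rw [hget, if_pos (by omega : pvCnt t < mw)]
      have h2 : ¬ done.length < (done ++ [t]).length - 1 := by simp
      rw [dif_neg h2]
      cases done with
      | nil =>
        rw [dif_neg (by simp)]
        simp [pvFinishB]
      | cons d ds =>
        rw [dif_pos (by simp)]
        have hne : (d :: ds) ≠ ([] : List String) := by simp
        have hlt1 : (d :: ds).length - 1 < (d :: ds).length := by simp
        have hgetp : (d :: ds ++ [t])[(d :: ds).length - 1]'(by simp) = (d :: ds)[(d :: ds).length - 1]'hlt1 := by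
          rw [List.getElem_append_left hlt1]
        have hset : ((d :: ds) ++ [t]).set ((d :: ds).length - 1) ((d :: ds)[(d :: ds).length - 1]'hlt1 ++ " " ++ t) = (d :: ds).set ((d :: ds).length - 1) ((d :: ds)[(d :: ds).length - 1]'hlt1 ++ " " ++ t) ++ [t] :=
          List.set_append_left _ _ hlt1
        rw [hgetp, hset]
        have hll : ((d :: ds).set ((d :: ds).length - 1) ((d :: ds)[(d :: ds).length - 1]'hlt1 ++ " " ++ t)).length ≤ (d :: ds).length := by simp
        rw [List.eraseIdx_append_of_length_le (by simp)]
        simp only [List.length_set, Nat.sub_self, List.eraseIdx_cons_zero, List.append_nil]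
        rw [pvPass2A]
        rw [dif_neg (by simp)]
        rw [pv_set_last _ _ hne, pvFinishB]
        simp only
        rw [if_pos hne, pv_getLast! _ hne hlt1]
  | cons p rest' ih =>
    intro done carry hrest hcarry
    obtain ⟨r, cr⟩ := p
    have hr : pvCnt r = cr := hrest (r, cr) (by simp)
    have hrest' : ∀ q ∈ rest', pvCnt q.1 = q.2 := fun q hq => hrest q (by simp [hq])
    match carry with
    | none =>
      by_cases hge : cr ≥ mw
      · have step : pvStep2B mw (done, none) (r, cr) = (done ++ [r], none) := by
          simp [pvStep2B, hge]
        rw [List.foldl_cons, step]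
        simp only [pvCarryL, List.append_nil, List.map_cons]
        rw [pvPass2A]
        have hlen : done.length < (done ++ r :: rest'.map Prod.fst).length := by simp
        rw [dif_pos hlen]
        have hget : (done ++ r :: rest'.map Prod.fst)[done.length]'hlen = r := by
          rw [List.getElem_append_right (le_refl _)]; simp
        rw [hget, if_neg (by omega : ¬ pvCnt r < mw)]
        have hsh : done ++ r :: rest'.map Prod.fst = (done ++ [r]) ++ pvCarryL none ++ rest'.map Prod.fst := by
          simp [pvCarryL]
        have hi : done.length + 1 = (done ++ [r]).length := by simp
        rw [hsh, hi]
        exact ih (done ++ [r]) none hrest' (by simp)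
      · have step : pvStep2B mw (done, none) (r, cr) = (done, some (r, cr)) := by
          simp [pvStep2B, hge]
        rw [List.foldl_cons, step]
        have := ih done (some (r, cr)) hrest' (by
          intro t c h
          cases h
          exact ⟨hr, by omega⟩)
        simpa [pvCarryL] using this
    | some (t, c) =>
      obtain ⟨htc, hlt⟩ := hcarry t c rfl
      have hct' : pvCnt (t ++ " " ++ r) = c + cr := by rw [pvCnt_append_space, htc, hr]
      simp only [pvCarryL, List.map_cons, List.append_assoc, List.singleton_append]
      rw [pvPass2A]
      have hlen : done.length < (done ++ t :: r :: rest'.map Prod.fst).length := by simp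
      rw [dif_pos hlen]
      have hget : (done ++ t :: r :: rest'.map Prod.fst)[done.length]'hlen = t := by
        rw [List.getElem_append_right (le_refl _)]; simp
      rw [hget, if_pos (by omega : pvCnt t < mw)]
      have h2 : done.length < (done ++ t :: r :: rest'.map Prod.fst).length - 1 := by simp
      rw [dif_pos h2]
      have hget1 : (done ++ t :: r :: rest'.map Prod.fst)[done.length + 1]'(by simp) = r := by
        rw [List.getElem_append_right (by omega)]
        simp
      rw [hget1]
      have hset : (done ++ t :: r :: rest'.map Prod.fst).set (done.length + 1) (t ++ " " ++ r) = done ++ t :: (t ++ " " ++ r) :: rest'.map Prod.fst := by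
        rw [List.set_append_right _ _ (by omega)]
        simp
      rw [hset, List.eraseIdx_append_of_length_le (le_refl _)]
      simp only [Nat.sub_self, List.eraseIdx_cons_zero]
      rw [List.foldl_cons]
      by_cases hge : c + cr ≥ mw
      · have step : pvStep2B mw (done, some (t, c)) (r, cr) = (done ++ [t ++ " " ++ r], none) := by
          simp [pvStep2B, hge]
        rw [step]
        rw [pvPass2A]
        have hlen2 : done.length < (done ++ (t ++ " " ++ r) :: rest'.map Prod.fst).length := by simp
        rw [dif_pos hlen2]
        have hget2 : (done ++ (t ++ " " ++ r) :: rest'.map Prod.fst)[done.length]'hlen2 = t ++ " " ++ r := by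
          rw [List.getElem_append_right (le_refl _)]; simp
        rw [hget2, if_neg (by omega : ¬ pvCnt (t ++ " " ++ r) < mw)]
        have hsh : done ++ (t ++ " " ++ r) :: rest'.map Prod.fst = (done ++ [t ++ " " ++ r]) ++ pvCarryL none ++ rest'.map Prod.fst := by
          simp [pvCarryL]
        have hi : done.length + 1 = (done ++ [t ++ " " ++ r]).length := by simp
        rw [hsh, hi]
        exact ih (done ++ [t ++ " " ++ r]) none hrest' (by simp)
      · have step : pvStep2B mw (done, some (t, c)) (r, cr) = (done, some (t ++ " " ++ r, c + cr)) := by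
          simp [pvStep2B, hge]
        rw [step]
        have := ih done (some (t ++ " " ++ r, c + cr)) hrest' (by
          intro u d h
          cases h
          exact ⟨hct', by omega⟩)
        simpa [pvCarryL] using this

-- one step of the first pass preserves the A/B state correspondence
theorem pv_step1_corr (mw : Int) (A : List String × String) (B : List (String × Int) × String × Int) (s : String)
    (h1 : A.1 = B.1.map Prod.fst) (h2 : A.2 = B.2.1) (h3 : pvCnt B.2.1 = B.2.2)
    (h4 : ∀ p ∈ B.1, pvCnt p.1 = p.2) :
    (pvStep1A mw A s).1 = (pvStep1B mw B (s, pvCnt s)).1.map Prod.fst ∧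
    (pvStep1A mw A s).2 = (pvStep1B mw B (s, pvCnt s)).2.1 ∧
    pvCnt (pvStep1B mw B (s, pvCnt s)).2.1 = (pvStep1B mw B (s, pvCnt s)).2.2 ∧
    ∀ p ∈ (pvStep1B mw B (s, pvCnt s)).1, pvCnt p.1 = p.2 := by
  obtain ⟨res, buffer⟩ := A
  obtain ⟨segs, buf, bufc⟩ := B
  simp only at h1 h2 h3 h4
  subst h1
  subst h2
  have hcnt : pvCnt (buffer ++ (if buffer ≠ "" then " " else "") ++ s) = bufc + pvCnt s := by
    by_cases hbe : buffer = ""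
    · subst hbe
      rw [pvCnt_empty] at h3
      rw [if_neg (by simp), String.empty_append, String.empty_append]
      omega
    · rw [if_pos hbe, pvCnt_append_space, h3]
  by_cases hge : pvCnt s ≥ mw
  · by_cases hbe : buffer = ""
    · have h0 : bufc = 0 := by subst hbe; rw [pvCnt_empty] at h3; omega
      subst h0
      subst hbe
      have eA : pvStep1A mw (segs.map Prod.fst, "") s = (segs.map Prod.fst ++ [s], "") := by
        simp [pvStep1A, hge]
      have eB : pvStep1B mw (segs, ("", 0)) (s, pvCnt s) = (segs ++ [(s, pvCnt s)], ("", 0)) := by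
        simp [pvStep1B, hge]
      rw [eA, eB]
      refine ⟨by simp, rfl, by simpa using pvCnt_empty, ?_⟩
      intro p hp
      rw [List.mem_append, List.mem_singleton] at hp
      rcases hp with hp | hp
      · exact h4 p hp
      · subst hp; rfl
    · have eA : pvStep1A mw (segs.map Prod.fst, buffer) s = (segs.map Prod.fst ++ [PySem.Str.strip buffer] ++ [s], "") := by
        simp [pvStep1A, hge, hbe]
      have eB : pvStep1B mw (segs, (buffer, bufc)) (s, pvCnt s) = ((segs ++ [(PySem.Str.strip buffer, bufc)]) ++ [(s, pvCnt s)], ("", 0)) := by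
        simp [pvStep1B, hge, hbe]
      rw [eA, eB]
      refine ⟨by simp, rfl, by simpa using pvCnt_empty, ?_⟩
      intro p hp
      rw [List.mem_append, List.mem_append, List.mem_singleton, List.mem_singleton] at hp
      rcases hp with (hp | hp) | hp
      · exact h4 p hp
      · subst hp; simpa [pvCnt_strip] using h3
      · subst hp; rfl
  · by_cases hflush : mw ≤ bufc + pvCnt s
    · have eA : pvStep1A mw (segs.map Prod.fst, buffer) s = (segs.map Prod.fst ++ [PySem.Str.strip (buffer ++ (if buffer ≠ "" then " " else "") ++ s)], "") := by
        simp only [pvStep1A, if_neg hge]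
        rw [if_pos (by rw [hcnt]; exact hflush)]
      have eB : pvStep1B mw (segs, (buffer, bufc)) (s, pvCnt s) = (segs ++ [(PySem.Str.strip (buffer ++ (if buffer ≠ "" then " " else "") ++ s), bufc + pvCnt s)], ("", 0)) := by
        simp only [pvStep1B]
        rw [if_neg (by simpa using hge), if_pos (by simpa using hflush)]
      rw [eA, eB]
      refine ⟨by simp, rfl, by simpa using pvCnt_empty, ?_⟩
      intro p hp
      rw [List.mem_append, List.mem_singleton] at hp
      rcases hp with hp | hp
      · exact h4 p hp
      · subst hp; simpa [pvCnt_strip] using hcnt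
    · have eA : pvStep1A mw (segs.map Prod.fst, buffer) s = (segs.map Prod.fst, buffer ++ (if buffer ≠ "" then " " else "") ++ s) := by
        simp only [pvStep1A, if_neg hge]
        rw [if_neg (by rw [hcnt]; omega)]
      have eB : pvStep1B mw (segs, (buffer, bufc)) (s, pvCnt s) = (segs, (buffer ++ (if buffer ≠ "" then " " else "") ++ s, bufc + pvCnt s)) := by
        simp only [pvStep1B]
        rw [if_neg (by simpa using hge), if_neg (by simpa using hflush)]
      rw [eA, eB]
      exact ⟨rfl, rfl, hcnt, h4⟩

theorem pv_pass1_corr (mw : Int) (ss : List String) : ∀ (A : List String × String) (B : List (String × Int) × String × Int),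
    A.1 = B.1.map Prod.fst → A.2 = B.2.1 → pvCnt B.2.1 = B.2.2 → (∀ p ∈ B.1, pvCnt p.1 = p.2) →
    (ss.foldl (pvStep1A mw) A).1 = ((ss.map (fun s => (s, pvCnt s))).foldl (pvStep1B mw) B).1.map Prod.fst ∧
    (ss.foldl (pvStep1A mw) A).2 = ((ss.map (fun s => (s, pvCnt s))).foldl (pvStep1B mw) B).2.1 ∧
    pvCnt ((ss.map (fun s => (s, pvCnt s))).foldl (pvStep1B mw) B).2.1 = ((ss.map (fun s => (s, pvCnt s))).foldl (pvStep1B mw) B).2.2 ∧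
    ∀ p ∈ ((ss.map (fun s => (s, pvCnt s))).foldl (pvStep1B mw) B).1, pvCnt p.1 = p.2 := by
  induction ss with
  | nil => intro A B h1 h2 h3 h4; exact ⟨h1, h2, h3, h4⟩
  | cons s ss' ih =>
    intro A B h1 h2 h3 h4
    obtain ⟨g1, g2, g3, g4⟩ := pv_step1_corr mw A B s h1 h2 h3 h4
    simpa using ih (pvStep1A mw A s) (pvStep1B mw B (s, pvCnt s)) g1 g2 g3 g4

theorem pv_seg_corr (mw : Int) (sentences : List String) :
    pvSegA sentences mw = pvSegB sentences (sentences.map pvCnt) mw := by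
  unfold pvSegA pvSegB
  rw [show sentences.zip (sentences.map pvCnt) = sentences.map (fun s => (s, pvCnt s)) from
    Eq.symm List.map_prod_left_eq_zip]
  obtain ⟨e1, e2, e3, e4⟩ := pv_pass1_corr mw sentences ([], "") ([], ("", 0)) (by simp) rfl (by simpa using pvCnt_empty) (by simp)
  set BF := (sentences.map fun s => (s, pvCnt s)).foldl (pvStep1B mw) ([], ("", 0)) with hBF
  set AF := sentences.foldl (pvStep1A mw) ([], "") with hAF
  set segs := if BF.2.1 ≠ "" then BF.1 ++ [(PySem.Str.strip BF.2.1, BF.2.2)] else BF.1 with hsegs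
  have hres : (if AF.2 ≠ "" then AF.1 ++ [PySem.Str.strip AF.2] else AF.1) = segs.map Prod.fst := by
    rw [hsegs, e1, e2]
    by_cases hb : BF.2.1 ≠ "" <;> simp [hb]
  have hinv : ∀ p ∈ segs, pvCnt p.1 = p.2 := by
    intro p hp
    rw [hsegs] at hp
    by_cases hb : BF.2.1 ≠ ""
    · rw [if_pos hb] at hp
      simp only [List.mem_append, List.mem_singleton] at hp
      rcases hp with hp | hp
      · exact e4 p hp
      · subst hp; simpa [pvCnt_strip] using e3
    · rw [if_neg hb] at hp
      exact e4 p hp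
  have hmain := pv_pass2_corr mw segs [] none hinv (by simp)
  have hl : ([] : List String) ++ pvCarryL none ++ List.map Prod.fst segs = List.map Prod.fst segs := by
    simp [pvCarryL]
  rw [hl] at hmain
  show pvPass2A mw (if AF.2 ≠ "" then AF.1 ++ [PySem.Str.strip AF.2] else AF.1) 0
      = pvFinishB (List.foldl (pvStep2B mw) ([], none) (if BF.2.1 ≠ "" then BF.1 ++ [(PySem.Str.strip BF.2.1, BF.2.2)] else BF.1))
  rw [hres, ← hsegs]
  exact hmain

theorem pv_loop_corr (sentences : List String) (max_segments : Int) :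
    ∀ fuel mw, pvLoopA sentences max_segments mw fuel = pvLoopB sentences (sentences.map pvCnt) max_segments mw fuel := by
  intro fuel
  induction fuel with
  | zero => intro mw; rfl
  | succ n ih =>
    intro mw
    simp only [pvLoopA, pvLoopB, pv_seg_corr]
    split
    · rfl
    · exact ih (mw + 1)

-- ===== VERDICT (by name: the statement is the Claim_ definition above) =====
theorem combine_short_sentences_spec : Claim_equal_combine_short_sentences := by
  intro sentences initial_min_words max_segments _
  unfold Spec_combine_short_sentences combine_short_sentences combine_short_sentences_alt
  exact pv_loop_corr sentences max_segments (pvFuel sentences initial_min_words) initial_min_words
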